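-- pv_equiv track=rewrite | github.com/GreatPark96/Coding_Tests | Python3/프로그래머스/1/135808. 과일 장수/과일 장수.py | solution
-- ===== SOURCE A (Python) =====
-- def solution(k, m, score):
--     answer = 0
--     score.sort(reverse = True)
--
--     box = []
--     boxCnt = int(len(score) / m)
--
--     for i in range(0, len(score), m):
--         if len(score[i:i+m]) == m:
--             box.append(score[i:i+m])
--     for j in range(0, len(box)):
--         answer += min(box[j]) * m
--     return answer
-- ===== SOURCE B (Python) =====
-- def solution(k, m, score):
--     # Counting approach: tally scores in a dict, walk the distinct values in
--     # descending order, and for each value count ARITHMETICALLY how many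
--     # box-minimum slots (positions p with (p+1) % m == 0, p < number of fully
--     # boxed fruits) fall inside that value's run of the descending order.
--     # No sorted copy of the full list and no per-box min scan is built.
--     # Note: A sorts `score` in place; B does not mutate its arguments.
--     if m <= 0:
--         return 0  # a box needs a positive size: no full box can be sold
--     freq = {}
--     for v in score:
--         freq[v] = freq.get(v, 0) + 1
--     limit = len(score) // m * m  # fruits that go into full boxes
--     total = 0
--     pos = 0
--     for v in sorted(freq, reverse=True):
--         hi = min(pos + freq[v], limit)
--         if hi > pos:
--             total += v * (hi // m - pos // m)
--         pos += freq[v]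
--     return total * m
-- ===== Notes on version B (the rewrite author's own statement) =====
-- stated objective: alternative
-- what changed: A sorts the whole list descending, builds a list of m-sized slices and scans each slice for its minimum; B never forms groups or takes a minimum: it tallies the scores in a dict, walks only the distinct values in descending order, and counts arithmetically (via floor divisions) how many box-minimum slots fall inside each value's run, trading the per-element second pass for a per-distinct-value one.
-- outside the precondition, e.g. on solution(0, 0, [1, 2]): A raises ZeroDivisionError, B returns 0
import Mathlib
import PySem

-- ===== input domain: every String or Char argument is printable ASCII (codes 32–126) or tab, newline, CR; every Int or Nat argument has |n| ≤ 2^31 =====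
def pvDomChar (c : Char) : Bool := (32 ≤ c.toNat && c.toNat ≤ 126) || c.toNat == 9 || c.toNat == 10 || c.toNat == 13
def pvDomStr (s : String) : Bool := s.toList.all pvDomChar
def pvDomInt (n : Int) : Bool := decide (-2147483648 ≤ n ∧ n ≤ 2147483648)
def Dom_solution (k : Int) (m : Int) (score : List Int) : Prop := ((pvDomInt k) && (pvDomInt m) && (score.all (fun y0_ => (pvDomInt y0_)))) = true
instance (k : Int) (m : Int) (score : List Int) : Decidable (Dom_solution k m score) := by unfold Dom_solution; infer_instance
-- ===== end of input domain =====

-- B replaces A's sort-slice-and-min-scan pipeline by a counting algorithm: tally the scores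
-- in a dict, walk the distinct values in descending order, and count arithmetically how many
-- box-minimum slots each value's run covers. A sorts `score` in place; B does not mutate its
-- arguments — the equivalence proved here is about the return value.

-- ===== PORT A =====
-- boxCnt = int(len(score) / m) is computed by A but never used; it is omitted here.
-- Python's min(box[j]) raises on an empty list; every appended box has length m ≥ 1 under
-- Pre_solution, so the `.getD 0` default below is never reached.
def solution (k : Int) (m : Int) (score : List Int) : Int :=
  let s := PySem.List.sorted score (fun x => x) true
  let box := (PySem.List.pyRange 0 s.length m).foldl
    (fun box i =>
      if ((PySem.List.slice s (some i) (some (i + m))).length : Int) = m then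
        box ++ [PySem.List.slice s (some i) (some (i + m))]
      else box) []
  (PySem.List.pyRange 0 box.length 1).foldl
    (fun answer j =>
      answer + ((PySem.List.min? (PySem.List.pyGetD box j []) (fun x => x)).getD 0) * m) 0

-- ===== PORT B =====
-- Source B evaluates freq[v] (= count of v) twice in the loop body; it is written out twice here too.
def solution_alt (k : Int) (m : Int) (score : List Int) : Int :=
  if m ≤ 0 then 0
  else
    let freq := score.foldl (fun d v => d.insert v (d.getD v 0 + 1))
      (PySem.Dict.empty : PySem.Dict Int Int)
    let limit := PySem.Int.floordiv (score.length : Int) m * m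
    let st := (PySem.List.sorted (PySem.Dict.keys freq) (fun x => x) true).foldl
      (fun (st : Int × Int) v =>
        (if min (st.2 + freq.getD v 0) limit > st.2 then
          st.1 + v * (PySem.Int.floordiv (min (st.2 + freq.getD v 0) limit) m
                      - PySem.Int.floordiv st.2 m)
         else st.1,
         st.2 + freq.getD v 0))
      (0, 0)
    st.1 * m

-- ===== PRECONDITION & SPEC =====
-- m = 0 makes A raise ZeroDivisionError (at int(len(score)/m)); nothing else raises.
def Pre_solution (k : Int) (m : Int) (score : List Int) : Prop := m ≠ 0
instance (k : Int) (m : Int) (score : List Int) : Decidable (Pre_solution k m score) := by unfold Pre_solution; infer_instance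
def pvWitness_solution : Int × Int × List Int := (0, 3, [4, 1, 2, 2, 3, 3, 1])

def Spec_solution (k : Int) (m : Int) (score : List Int) (out : Int) : Prop := out = solution_alt k m score
instance (k : Int) (m : Int) (score : List Int) (out : Int) : Decidable (Spec_solution k m score out) := by unfold Spec_solution; infer_instance

-- ===== CLAIM (what is proved, stated in full; the proofs are below) =====
def Claim_equal_solution : Prop := ∀ (k : Int) (m : Int) (score : List Int), Dom_solution k m score → Pre_solution k m score → Spec_solution k m score (solution k m score)

-- ===== LEMMAS AND PROOFS =====

-- the descending-sorted list, and the sum of the final element of each of its full m-boxes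
def pvS (score : List Int) : List Int := PySem.List.sorted score (fun x => x) true
def pvStr (score : List Int) (M : Nat) : Int :=
  ((List.range ((pvS score).length / M)).map (fun j => (pvS score).getD (j * M + (M - 1)) 0)).sum

-- pvH M lim l p: sum of the elements of l sitting (at global offset p) on a "box-minimum slot",
-- i.e. at a global position q with q < lim and (q+1) divisible by M
def pvH (M lim : Nat) : List Int → Nat → Int
  | [], _ => 0
  | x :: xs, p => (if p < lim ∧ (p + 1) % M = 0 then x else 0) + pvH M lim xs (p + 1)

theorem pvH_append (M lim : Nat) (a b : List Int) :
    ∀ p, pvH M lim (a ++ b) p = pvH M lim a p + pvH M lim b (p + a.length) := by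
  induction a with
  | nil => intro p; simp [pvH]
  | cons x xs ih =>
    intro p
    simp only [List.cons_append, pvH, ih (p + 1), List.length_cons]
    ring_nf

theorem pvH_shift (M lim : Nat) (l : List Int) :
    ∀ p, pvH M (lim + M) l (p + M) = pvH M lim l p := by
  induction l with
  | nil => intro p; simp [pvH]
  | cons x xs ih =>
    intro p
    have h1 : (p + M < lim + M) = (p < lim) := by simp [Nat.add_lt_add_iff_right]
    have h2 : (p + M + 1) % M = (p + 1) % M := by
      rw [show p + M + 1 = p + 1 + M by ring, Nat.add_mod_right]
    simp only [pvH, Nat.add_lt_add_iff_right, show p + M + 1 = p + 1 + M from by ring,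
      Nat.add_mod_right, ih]

theorem pvH_lim_zero (M : Nat) (l : List Int) : ∀ p, pvH M 0 l p = 0 := by
  induction l with
  | nil => intro p; simp [pvH]
  | cons x xs ih => intro p; simp [pvH, ih (p + 1)]

theorem pvH_block (M lim : Nat) (hM : 0 < M) (hlim : M ≤ lim) :
    ∀ (block : List Int) (p : Nat), p < M → block.length = M - p →
      pvH M lim block p = block.getD (M - 1 - p) 0 := by
  intro block
  induction block with
  | nil => intro p hp hlen; simp at hlen; omega
  | cons x xs ih =>
    intro p hp hlen
    simp only [List.length_cons] at hlen
    by_cases hlast : p + 1 = M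
    · have hxs : xs = [] := by
        have : xs.length = 0 := by omega
        exact List.length_eq_zero_iff.mp this
      have hd : (p + 1) % M = 0 := by rw [hlast]; exact Nat.mod_self M
      have hidx : M - 1 - p = 0 := by omega
      simp [pvH, hxs, hd, hidx, Nat.lt_of_lt_of_le hp hlim]
    · have hmod : (p + 1) % M = p + 1 := Nat.mod_eq_of_lt (by omega)
      have hcond : ¬ (p < lim ∧ (p + 1) % M = 0) := by
        rintro ⟨-, h0⟩; omega
      have hidx : M - 1 - p = (M - 1 - (p + 1)) + 1 := by omega
      simp only [pvH, if_neg hcond, zero_add, hidx, List.getD_cons_succ]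
      exact ih (p + 1) (by omega) (by omega)

theorem pvH_stride (M : Nat) (hM : 0 < M) :
    ∀ (n : Nat) (s : List Int), s.length / M = n →
      pvH M (n * M) s 0 = ((List.range n).map (fun j => s.getD (j * M + (M - 1)) 0)).sum := by
  intro n
  induction n with
  | zero => intro s _; simp [pvH_lim_zero]
  | succ n ih =>
    intro s hlen
    have hMle : M ≤ s.length := by
      by_contra h
      rw [Nat.div_eq_of_lt (by omega)] at hlen
      omega
    have htake : (s.take M).length = M := by rw [List.length_take]; omega
    have hdroplen : (s.drop M).length = s.length - M := by simp
    have hdropdiv : (s.drop M).length / M = n := by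
      have h1 := Nat.add_div_right (s.length - M) hM
      rw [Nat.sub_add_cancel hMle] at h1
      rw [hdroplen]
      omega
    have hsplit : s = s.take M ++ s.drop M := (List.take_append_drop M s).symm
    have hn1 : (n + 1) * M = n * M + M := by ring
    calc pvH M ((n + 1) * M) s 0
        = pvH M ((n + 1) * M) (s.take M ++ s.drop M) 0 := by rw [← hsplit]
      _ = pvH M ((n + 1) * M) (s.take M) 0 + pvH M ((n + 1) * M) (s.drop M) M := by
          rw [pvH_append, htake, Nat.zero_add]
      _ = (s.take M).getD (M - 1) 0 + pvH M (n * M) (s.drop M) 0 := by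
          rw [pvH_block M ((n + 1) * M) hM (by nlinarith) (s.take M) 0 hM (by omega)]
          have hsh := pvH_shift M (n * M) (s.drop M) 0
          rw [Nat.zero_add] at hsh
          rw [hn1, hsh, Nat.sub_zero]
      _ = ((List.range (n + 1)).map (fun j => s.getD (j * M + (M - 1)) 0)).sum := by
          rw [ih (s.drop M) hdropdiv]
          rw [List.range_succ_eq_map, List.map_cons, List.sum_cons, List.map_map]
          congr 1
          · have h1 : M - 1 < (s.take M).length := by omega
            rw [List.getD_eq_getElem _ _ h1, List.getD_eq_getElem _ _ (by omega : 0 * M + (M - 1) < s.length)]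
            rw [List.getElem_take]
            congr 1
            omega
          · apply congrArg List.sum
            apply List.map_congr_left
            intro j hj
            have hjn : j < n := List.mem_range.mp hj
            have hnM : n * M ≤ s.length - M := by
              rw [← hdropdiv, ← hdroplen]; exact Nat.div_mul_le_self _ _
            have hjM : j * M + (M - 1) < s.length - M := by
              have : (j + 1) * M ≤ n * M := Nat.mul_le_mul_right M (by omega)
              have h2 : (j + 1) * M = j * M + M := by ring
              omega
            simp only [Function.comp]
            rw [List.getD_eq_getElem _ _ (by omega : j * M + (M - 1) < (s.drop M).length)]
            rw [List.getD_eq_getElem _ _ (by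
              have h3 : (Nat.succ j) * M = j * M + M := Nat.succ_mul j M
              omega : (Nat.succ j) * M + (M - 1) < s.length)]
            rw [List.getElem_drop]
            congr 1
            have h3 : (Nat.succ j) * M = j * M + M := Nat.succ_mul j M
            omega

theorem pvH_replicate (M lim : Nat) (hM : 0 < M) (v : Int) (rest : List Int) :
    ∀ (c p : Nat),
      pvH M lim (List.replicate c v ++ rest) p
        = v * ((min (p + c) lim / M - p / M : Nat) : Int) + pvH M lim rest (p + c) := by
  intro c
  induction c with
  | zero =>
    intro p
    have h0 : min p lim / M - p / M = 0 :=
      Nat.sub_eq_zero_of_le (Nat.div_le_div_right (min_le_left _ _))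
    simp [h0]
  | succ c ih =>
    intro p
    have hrep : List.replicate (c + 1) v = v :: List.replicate c v := rfl
    rw [hrep, List.cons_append]
    show (if p < lim ∧ (p + 1) % M = 0 then v else 0)
          + pvH M lim (List.replicate c v ++ rest) (p + 1)
        = v * ((min (p + (c + 1)) lim / M - p / M : Nat) : Int) + pvH M lim rest (p + (c + 1))
    rw [ih (p + 1)]
    have harg : p + 1 + c = p + (c + 1) := by ring
    rw [harg]
    have hsucc : (p + 1) / M = p / M + (if M ∣ p + 1 then 1 else 0) := Nat.succ_div
    by_cases hp : p < lim
    · have hple : p + 1 ≤ min (p + (c + 1)) lim := le_min (by omega) (by omega)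
      have hbX : (p + 1) / M ≤ min (p + (c + 1)) lim / M := Nat.div_le_div_right hple
      have haX : p / M ≤ min (p + (c + 1)) lim / M :=
        le_trans (Nat.div_le_div_right (by omega)) hbX
      have hdvd : ((p + 1) % M = 0) ↔ (M ∣ p + 1) := Nat.dvd_iff_mod_eq_zero.symm
      by_cases hd : M ∣ p + 1
      · rw [if_pos ⟨hp, hdvd.mpr hd⟩]
        rw [if_pos hd] at hsucc
        have hcomb : p / M + 1 ≤ min (p + (c + 1)) lim / M := by omega
        rw [show (min (p + (c + 1)) lim / M - (p + 1) / M : Nat)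
              = min (p + (c + 1)) lim / M - (p / M + 1) from by omega]
        rw [Nat.cast_sub hcomb, Nat.cast_sub haX]
        push_cast
        ring
      · rw [if_neg (by rintro ⟨-, h0⟩; exact hd (hdvd.mp h0))]
        rw [if_neg hd] at hsucc
        rw [show (p + 1) / M = p / M by omega]
        ring
    · rw [if_neg (by rintro ⟨h0, -⟩; exact hp h0)]
      have hXle : min (p + (c + 1)) lim / M ≤ p / M :=
        le_trans (Nat.div_le_div_right (min_le_right _ _))
          (Nat.div_le_div_right (by omega))
      have hXle1 : min (p + (c + 1)) lim / M ≤ (p + 1) / M :=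
        le_trans hXle (Nat.div_le_div_right (by omega))
      rw [Nat.sub_eq_zero_of_le hXle, Nat.sub_eq_zero_of_le hXle1]
      simp

theorem pvCount_flatMap (c : Int → Nat) (x : Int) :
    ∀ ks : List Int, ks.Nodup →
      (ks.flatMap (fun v => List.replicate (c v) v)).count x = if x ∈ ks then c x else 0 := by
  intro ks hnd
  induction ks with
  | nil => simp
  | cons v ks ih =>
    rcases List.nodup_cons.mp hnd with ⟨hv, hnd'⟩
    rw [List.flatMap_cons, List.count_append, ih hnd', List.count_replicate]
    by_cases hx : x = v
    · subst hx
      simp [hv]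
    · simp [hx, Ne.symm hx, List.mem_cons]

theorem pvFlatMap_pairwise (c : Int → Nat) (ks : List Int)
    (h : ks.Pairwise (fun a b => b ≤ a)) :
    (ks.flatMap (fun v => List.replicate (c v) v)).Pairwise (fun a b : Int => b ≤ a) := by
  rw [List.pairwise_flatMap]
  constructor
  · intro a _
    exact List.pairwise_replicate.mpr (Or.inr le_rfl)
  · apply h.imp_of_mem
    intro a b _ _ hab x hx y hy
    rw [List.eq_of_mem_replicate hx, List.eq_of_mem_replicate hy]
    exact hab

-- the descending-sorted list is the runs of its distinct values in descending order
theorem pvSortedFlat (score : List Int) :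
    pvS score
      = (PySem.List.sorted (PySem.Set.ofList score) (fun x => x) true).flatMap
          (fun v => List.replicate (List.count v score) v) := by
  have hksnd : (PySem.List.sorted (PySem.Set.ofList score) (fun x => x) true).Nodup :=
    ((PySem.List.sorted_perm (PySem.Set.ofList score) (fun x => x) true).nodup_iff).mpr
      (PySem.Set.nodup_ofList score)
  have hksmem : ∀ x : Int, x ∈ PySem.List.sorted (PySem.Set.ofList score) (fun x => x) true ↔ x ∈ score := by
    intro x
    rw [PySem.List.mem_sorted, PySem.Set.mem_ofList]
  have hperm : (pvS score).Perm
      ((PySem.List.sorted (PySem.Set.ofList score) (fun x => x) true).flatMap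
        (fun v => List.replicate (List.count v score) v)) := by
    rw [List.perm_iff_count]
    intro a
    rw [pvCount_flatMap (fun v => List.count v score) a _ hksnd]
    have h1 : (pvS score).count a = score.count a :=
      (PySem.List.sorted_perm score (fun x => x) true).count_eq a
    rw [h1]
    by_cases hx : a ∈ PySem.List.sorted (PySem.Set.ofList score) (fun x => x) true
    · rw [if_pos hx]
    · rw [if_neg hx]
      exact List.count_eq_zero.mpr (fun h => hx ((hksmem a).mpr h))
  have hp1 : (pvS score).Pairwise (fun a b : Int => b ≤ a) :=
    PySem.List.sorted_pairwise_rev score (fun x => x)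
  have hp2 : ((PySem.List.sorted (PySem.Set.ofList score) (fun x => x) true).flatMap
      (fun v => List.replicate (List.count v score) v)).Pairwise (fun a b : Int => b ≤ a) :=
    pvFlatMap_pairwise (fun v => List.count v score) _
      (PySem.List.sorted_pairwise_rev (PySem.Set.ofList score) (fun x => x))
  exact List.eq_of_perm_of_sorted (fun a b _ _ h1 h2 => le_antisymm h2 h1) hp1 hp2 hperm

-- B's per-value loop accumulates exactly the slot sums of the runs
theorem pvFoldB (M lim : Nat) (hM : 0 < M) (c : Int → Nat) :
    ∀ (ks : List Int) (t : Int) (p : Nat),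
      (ks.foldl
        (fun (st : Int × Int) v =>
          (if min (st.2 + (c v : Int)) ((lim : Nat) : Int) > st.2 then
            st.1 + v * (PySem.Int.floordiv (min (st.2 + (c v : Int)) ((lim : Nat) : Int)) (M : Int)
                        - PySem.Int.floordiv st.2 (M : Int))
           else st.1,
           st.2 + (c v : Int)))
        (t, ((p : Nat) : Int))).1
      = t + pvH M lim (ks.flatMap (fun v => List.replicate (c v) v)) p := by
  intro ks
  induction ks with
  | nil => intro t p; simp [pvH]
  | cons v ks ih =>
    intro t p
    rw [List.foldl_cons, List.flatMap_cons]
    have hcast : ((p : Nat) : Int) + ((c v : Nat) : Int) = (((p + c v : Nat)) : Int) := by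
      push_cast; ring
    simp only [hcast]
    rw [← Nat.cast_min]
    simp only [PySem.Int.floordiv_natCast]
    rw [ih _ (p + c v)]
    rw [pvH_replicate M lim hM v _ (c v) p]
    by_cases hgt : p < min (p + c v) lim
    · rw [if_pos (by exact_mod_cast hgt : ((p : Nat) : Int) < ((min (p + c v) lim : Nat) : Int))]
      rw [← Nat.cast_sub (Nat.div_le_div_right hgt.le)]
      ring
    · rw [if_neg (by exact_mod_cast hgt :
        ¬ ((p : Nat) : Int) < ((min (p + c v) lim : Nat) : Int))]
      rw [Nat.sub_eq_zero_of_le (Nat.div_le_div_right (Nat.le_of_not_lt hgt))]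
      simp [add_assoc]

-- 'if p(x): out.append(f(x))' over a list builds acc ++ map f (filter p l)  (Prop-valued test)
theorem pvFoldlIfAppend {α β : Type} (l : List α) (p : α → Prop) [DecidablePred p]
    (f : α → β) (acc : List β) :
    l.foldl (fun a x => if p x then a ++ [f x] else a) acc
      = acc ++ (l.filter (fun x => decide (p x))).map f := by
  induction l generalizing acc with
  | nil => simp
  | cons x t ih =>
    by_cases h : p x <;> simp [h, ih]

theorem pvFilterRangeLt (n C : Nat) (h : n ≤ C) :
    (List.range C).filter (fun k => decide (k < n)) = List.range n := by
  obtain ⟨d, rfl⟩ : ∃ d, C = n + d := ⟨C - n, by omega⟩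
  rw [List.range_add, List.filter_append]
  have h1 : (List.range n).filter (fun k => decide (k < n)) = List.range n :=
    List.filter_eq_self.mpr (by intro a ha; simp [List.mem_range.mp ha])
  have h2 : ((List.range d).map (n + ·)).filter (fun k => decide (k < n)) = [] := by
    apply List.filter_eq_nil_iff.mpr
    intro a ha
    simp only [List.mem_map, List.mem_range] at ha
    obtain ⟨b, _, rfl⟩ := ha
    simp
  rw [h1, h2, List.append_nil]

-- in a ≥-sorted list the last element is a lower bound
theorem pvGetLastLe (l : List Int) (hd : l.Pairwise (fun a b => b ≤ a)) (h : l ≠ []) :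
    ∀ y ∈ l, l.getLast h ≤ y := by
  induction l with
  | nil => simp at h
  | cons a t ih =>
    rcases List.pairwise_cons.mp hd with ⟨ha, ht⟩
    intro y hy
    rcases List.mem_cons.mp hy with rfl | hyt
    · cases t with
      | nil => simp [List.getLast]
      | cons b u =>
        have hne : (b :: u) ≠ [] := by simp
        rw [List.getLast_cons hne]
        exact le_trans (ih ht hne _ (List.getLast_mem hne)) (ha _ (List.getLast_mem hne))
    · cases t with
      | nil => simp at hyt
      | cons b u =>
        have hne : (b :: u) ≠ [] := by simp
        rw [List.getLast_cons hne]
        exact ih ht hne y hyt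

-- Python min of a ≥-sorted nonempty list is its last element
theorem pvMinDesc (l : List Int) (hd : l.Pairwise (fun a b => b ≤ a)) (h : l ≠ []) :
    PySem.List.min? l (fun x => x) = some (l.getLast h) := by
  obtain ⟨v, hv⟩ : ∃ v, PySem.List.min? l (fun x => x) = some v := by
    cases hm : PySem.List.min? l (fun x => x) with
    | none => exact absurd ((PySem.List.min?_eq_none_iff l _).mp hm) h
    | some v => exact ⟨v, rfl⟩
  have h1 : v ≤ l.getLast h := PySem.List.min?_isMin hv _ (List.getLast_mem h)
  have h2 : l.getLast h ≤ v := pvGetLastLe l hd h v (PySem.List.min?_mem hv)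
  rw [hv, le_antisymm h1 h2]

theorem pvApos (kk : Int) (M : Nat) (hM : 0 < M) (score : List Int) :
    solution kk (M : Int) score = pvStr score M * (M : Int) := by
  have hm : (0 : Int) < (M : Int) := by exact_mod_cast hM
  simp only [solution, pvStr, pvS]
  set s := PySem.List.sorted score (fun x => x) true with hs
  set L := s.length with hL
  set n := L / M with hn
  set g : Nat → List Int := fun t => (s.drop (M * t)).take M with hg
  have hfull : ∀ t, t < n → M * t + M ≤ L := by
    intro t ht
    have h1 := (Nat.le_div_iff_mul_le hM).mp (by omega : t + 1 ≤ n)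
    rw [Nat.succ_mul] at h1
    have h2 : M * t = t * M := Nat.mul_comm M t
    omega
  have hnotfull : ∀ t, ¬ t < n → L < M * t + M := by
    intro t ht
    have h1 := (Nat.div_lt_iff_lt_mul hM).mp (by omega : n < t + 1)
    rw [Nat.succ_mul] at h1
    have h2 : M * t = t * M := Nat.mul_comm M t
    omega
  -- the box list is the first n windows
  have hbox : (PySem.List.pyRange 0 (L : Int) (M : Int)).foldl
      (fun box i =>
        if ((PySem.List.slice s (some i) (some (i + (M : Int)))).length : Int) = (M : Int) then
          box ++ [PySem.List.slice s (some i) (some (i + (M : Int)))]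
        else box) []
      = (List.range n).map g := by
    rw [PySem.List.pyRange_of_pos 0 (L : Int) hm, List.foldl_map]
    set C := (if (0 : Int) < (L : Int) then (((L : Int) - 0 + (M : Int) - 1) / (M : Int)).toNat else 0) with hC
    have hnC : n ≤ C := by
      by_cases hL0 : (0 : Int) < (L : Int)
      · have h1 : ((n : Int)) ≤ ((L : Int) - 0 + (M : Int) - 1) / (M : Int) := by
          rw [Int.le_ediv_iff_mul_le hm]
          have h2 : n * M ≤ L := Nat.div_mul_le_self L M
          have h3 : ((n * M : Nat) : Int) = (n : Int) * (M : Int) := by push_cast; ring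
          omega
        simp only [hC, if_pos hL0]
        omega
      · have : L = 0 := by omega
        simp [hn, this]
    have hcong : ∀ (acc : List (List Int)) (t : Nat), t ∈ List.range C →
        (if ((PySem.List.slice s (some (0 + (M : Int) * (t : Int))) (some (0 + (M : Int) * (t : Int) + (M : Int)))).length : Int) = (M : Int) then
          acc ++ [PySem.List.slice s (some (0 + (M : Int) * (t : Int))) (some (0 + (M : Int) * (t : Int) + (M : Int)))]
        else acc)
        = (if t < n then acc ++ [g t] else acc) := by
      intro acc t _
      have e1 : (0 : Int) + (M : Int) * (t : Int) = ((M * t : Nat) : Int) := by push_cast; ring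
      rw [e1, PySem.List.slice_natCast_add]
      have e2 : ((s.drop (M * t)).take M).length = min M (L - M * t) := by
        simp [hL]
      by_cases hc : t < n
      · have : min M (L - M * t) = M := by have := hfull t hc; omega
        rw [if_pos (by rw [e2, this]), if_pos hc]
      · have hne : ¬ (((s.drop (M * t)).take M).length : Int) = (M : Int) := by
          rw [e2]
          have := hnotfull t hc
          have : min M (L - M * t) < M := by omega
          exact_mod_cast Nat.ne_of_lt this
        rw [if_neg hne, if_neg hc]
    rw [PySem.List.foldl_congr_mem _ _ _ _ hcong]
    rw [pvFoldlIfAppend (List.range C) (fun t => t < n) g []]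
    rw [pvFilterRangeLt n C hnC]
    simp
  rw [hbox]
  rw [List.length_map, List.length_range]
  rw [PySem.List.pyRange_zero_natCast n, List.foldl_map, PySem.List.foldl_add, zero_add]
  have hmap : (List.range n).map
        (fun (t : Nat) => ((PySem.List.min? (PySem.List.pyGetD ((List.range n).map g) ((t : Nat) : Int) []) (fun x => x)).getD 0) * (M : Int))
      = (List.range n).map (fun (t : Nat) => (s.getD (t * M + (M - 1)) 0) * (M : Int)) := by
    apply List.map_congr_left
    intro t ht
    have htn : t < n := List.mem_range.mp ht
    have hfull' := hfull t htn
    have hcm : M * t = t * M := Nat.mul_comm M t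
    have hidx : t * M + (M - 1) < L := by omega
    have hget : PySem.List.pyGetD ((List.range n).map g) (t : Int) [] = g t := by
      rw [PySem.List.pyGetD_natCast, List.getD_eq_getElem _ _ (by simp [htn])]
      simp
    have hglen : (g t).length = M := by simp [hg]; omega
    have hgne : g t ≠ [] := by
      intro h; rw [h] at hglen; simp at hglen; omega
    have hpair : (g t).Pairwise (fun a b => b ≤ a) := by
      exact List.Pairwise.sublist ((List.take_sublist _ _).trans (List.drop_sublist _ _))
        (PySem.List.sorted_pairwise_rev score (fun x => x))
    have hlast : (g t).getLast hgne = s[t * M + (M - 1)]'(by omega) := by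
      rw [List.getLast_eq_getElem]
      simp only [hg] at hglen ⊢
      simp only [List.getElem_take, List.getElem_drop]
      congr 1
      omega
    rw [hget, pvMinDesc (g t) hpair hgne, Option.getD_some, hlast,
        List.getD_eq_getElem _ _ (by omega : t * M + (M - 1) < s.length)]
  rw [hmap, List.sum_map_mul_right]

theorem pvBpos (kk : Int) (M : Nat) (hM : 0 < M) (score : List Int) :
    solution_alt kk (M : Int) score = pvStr score M * (M : Int) := by
  have hnle : ¬ ((M : Int) ≤ 0) := by
    push_cast
    omega
  simp only [solution_alt, if_neg hnle]
  simp only [PySem.Dict.foldl_insert_getD_add_one_eq_counter, PySem.Dict.keys_counter,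
    PySem.Dict.getD_counter]
  have hfd : PySem.Int.floordiv ((score.length : Nat) : Int) ((M : Nat) : Int) * ((M : Nat) : Int)
      = (((score.length / M * M : Nat)) : Int) := by
    rw [PySem.Int.floordiv_natCast]
    push_cast
    ring
  rw [hfd]
  rw [show ((0 : Int), (0 : Int)) = ((0 : Int), ((0 : Nat) : Int)) from by norm_num]
  rw [pvFoldB M (score.length / M * M) hM (fun v => List.count v score) _ 0 0]
  rw [← pvSortedFlat score, zero_add]
  have hlen : (pvS score).length / M = score.length / M := by
    rw [pvS, PySem.List.length_sorted]
  rw [pvH_stride M hM (score.length / M) (pvS score) (by rw [← hlen, pvS])]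
  rw [pvStr, hlen]

theorem pvAneg (kk m : Int) (score : List Int) (hm : m < 0) : solution kk m score = 0 := by
  simp only [solution]
  rw [PySem.List.pyRange_of_neg _ _ hm]
  have hny : ¬ (((PySem.List.sorted score (fun x => x) true).length : Int) < 0) := by
    exact Int.not_lt.mpr (Int.natCast_nonneg _)
  rw [if_neg hny]
  simp [PySem.List.pyRange_one_eq_nil]

theorem pvBneg (kk m : Int) (score : List Int) (hm : m ≤ 0) : solution_alt kk m score = 0 := by
  simp [solution_alt, hm]

-- ===== VERDICT (by name: the statement is the Claim_ definition above) =====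
theorem solution_spec : Claim_equal_solution := by
  intro k m score _ hpre
  unfold Spec_solution
  rcases lt_or_gt_of_ne hpre with hm | hm
  · rw [pvAneg k m score hm, pvBneg k m score hm.le]
  · obtain ⟨M, rfl⟩ : ∃ M : Nat, m = (M : Int) := ⟨m.toNat, (Int.toNat_of_nonneg hm.le).symm⟩
    have hM : 0 < M := by exact_mod_cast hm
    rw [pvApos k M hM score, pvBpos k M hM score]
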